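-- pv_equiv track=rewrite | github.com/Sidhrthg/causal-engine | src/minerals/do_calculus.py | _make_kernel
-- ===== SOURCE A (Python) =====
-- from typing import Any, Dict, FrozenSet, List, Optional, Set, Tuple
--
-- def _make_kernel(vi: str, scope: FrozenSet[str], topo: List[str], P_label: str) -> str:
--     """
--     Build the Markov kernel P(vi | predecessors in topo that are in scope).
--
--     In Line 7 of the ID algorithm, the formula for each node vi in S' is
--     P(vi | V_{pi<i} intersect S', V_{pi<i} setminus S'), which equals
--     P(vi | all predecessors of vi in the full topological order),
--     but expressed relative to the scope S'.
--     """
--     try: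
--         idx = topo.index(vi)
--     except ValueError:
--         return f"{P_label}({vi})"
--     all_preds = topo[:idx]
--     in_scope = [v for v in all_preds if v in scope]
--     out_scope = [v for v in all_preds if v not in scope]
--     cond = in_scope + out_scope
--     if not cond:
--         return f"{P_label}({vi})"
--     return f"{P_label}({vi}|{','.join(cond)})"
-- ===== SOURCE B (Python) =====
-- def _make_kernel(vi, scope, topo, P_label):
--     # single walk over topo: partition predecessors into two accumulators
--     # as we go, and stop at the first occurrence of vi.
--     ins, outs = [], []
--     for v in topo:
--         if v == vi:
--             cond = ins + outs
--             if cond: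
--                 return f"{P_label}({vi}|{','.join(cond)})"
--             return f"{P_label}({vi})"
--         if v in scope:
--             ins.append(v)
--         else:
--             outs.append(v)
--     return f"{P_label}({vi})"
-- ===== Notes on version B (the rewrite author's own statement) =====
-- stated objective: alternative
-- what changed: Replaces index()+slice+two filtering passes+concatenation by a single walk over topo that partitions predecessors into two accumulators on the fly and stops at the first occurrence of vi.
import Mathlib
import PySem

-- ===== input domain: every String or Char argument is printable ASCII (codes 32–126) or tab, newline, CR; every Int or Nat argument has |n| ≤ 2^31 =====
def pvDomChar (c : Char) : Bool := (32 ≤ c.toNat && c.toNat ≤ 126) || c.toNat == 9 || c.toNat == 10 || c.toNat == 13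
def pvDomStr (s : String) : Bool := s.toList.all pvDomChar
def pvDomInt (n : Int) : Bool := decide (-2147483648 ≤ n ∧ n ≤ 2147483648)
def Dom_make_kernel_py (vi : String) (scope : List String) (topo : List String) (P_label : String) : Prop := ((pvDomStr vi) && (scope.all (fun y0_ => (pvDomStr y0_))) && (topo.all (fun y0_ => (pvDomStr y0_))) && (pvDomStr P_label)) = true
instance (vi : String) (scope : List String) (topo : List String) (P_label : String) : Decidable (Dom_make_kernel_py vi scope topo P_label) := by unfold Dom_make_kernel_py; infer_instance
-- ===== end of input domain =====

-- B replaces A's index()+slice+two filtering passes+concatenation by a single walk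
-- over topo that partitions predecessors into two accumulators and stops at vi
-- (alternative decomposition; same cost).

-- ===== PORT A =====
def make_kernel_py (vi : String) (scope : List String) (topo : List String) (P_label : String) : String :=
  match PySem.List.index? topo vi with
  | none => P_label ++ "(" ++ vi ++ ")"
  | some idx =>
    let all_preds := PySem.List.slice topo none (some ((idx : Nat) : Int))
    let in_scope := all_preds.filter (fun v => scope.contains v)
    let out_scope := all_preds.filter (fun v => !scope.contains v)
    let cond := in_scope ++ out_scope
    if cond = [] then P_label ++ "(" ++ vi ++ ")"
    else P_label ++ "(" ++ vi ++ "|" ++ PySem.Str.join "," cond ++ ")"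

-- ===== PORT B =====
-- the single walk of Source B: two accumulators, stop at the first occurrence of vi
def make_kernel_alt_go (vi : String) (scope : List String) (P_label : String) :
    List String → List String → List String → String
  | [], _, _ => P_label ++ "(" ++ vi ++ ")"
  | v :: rest, ins, outs =>
    if v = vi then
      let cond := ins ++ outs
      if cond = [] then P_label ++ "(" ++ vi ++ ")"
      else P_label ++ "(" ++ vi ++ "|" ++ PySem.Str.join "," cond ++ ")"
    else if scope.contains v then make_kernel_alt_go vi scope P_label rest (ins ++ [v]) outs
    else make_kernel_alt_go vi scope P_label rest ins (outs ++ [v])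

def make_kernel_py_alt (vi : String) (scope : List String) (topo : List String) (P_label : String) : String :=
  make_kernel_alt_go vi scope P_label topo [] []

-- ===== PRECONDITION & SPEC =====
def Spec_make_kernel_py (vi : String) (scope : List String) (topo : List String) (P_label : String) (out : String) : Prop := out = make_kernel_py_alt vi scope topo P_label
instance (vi : String) (scope : List String) (topo : List String) (P_label : String) (out : String) : Decidable (Spec_make_kernel_py vi scope topo P_label out) := by unfold Spec_make_kernel_py; infer_instance

-- ===== CLAIM (what is proved, stated in full; the proofs are below) =====
def Claim_equal_make_kernel_py : Prop := ∀ (vi : String) (scope : List String) (topo : List String) (P_label : String), Dom_make_kernel_py vi scope topo P_label → Spec_make_kernel_py vi scope topo P_label (make_kernel_py vi scope topo P_label)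

-- ===== LEMMAS AND PROOFS =====

-- rendering helper used only to state the loop invariant
def pvRender (vi P_label : String) (cond : List String) : String :=
  if cond = [] then P_label ++ "(" ++ vi ++ ")"
  else P_label ++ "(" ++ vi ++ "|" ++ PySem.Str.join "," cond ++ ")"

-- loop invariant of B's walk: it computes the first index of vi, and renders the
-- accumulators extended by the partition of the prefix before that index
lemma make_kernel_alt_go_eq (vi P_label : String) (scope : List String) :
    ∀ (topo ins outs : List String),
      make_kernel_alt_go vi scope P_label topo ins outs =
        match PySem.List.index? topo vi with
        | none => P_label ++ "(" ++ vi ++ ")"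
        | some n =>
            pvRender vi P_label
              ((ins ++ (topo.take n).filter (fun v => scope.contains v)) ++
               (outs ++ (topo.take n).filter (fun v => !scope.contains v))) := by
  intro topo
  induction topo with
  | nil => intro ins outs; simp [make_kernel_alt_go, PySem.List.index?]
  | cons v rest ih =>
    intro ins outs
    by_cases hv : v = vi
    · subst hv
      rw [PySem.List.index?_cons_self]
      simp [make_kernel_alt_go, pvRender]
    · rw [PySem.List.index?_cons_of_ne rest hv]
      cases hidx : PySem.List.index? rest vi with
      | none =>
        by_cases hs : scope.contains v = true
        · simp only [make_kernel_alt_go, if_neg hv, if_pos hs]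
          rw [ih, hidx]; simp
        · simp only [make_kernel_alt_go, if_neg hv, if_neg hs]
          rw [ih, hidx]; simp
      | some n =>
        by_cases hs : scope.contains v = true
        · have hs' : v ∈ scope := by simpa using hs
          simp only [make_kernel_alt_go, if_neg hv, if_pos hs]
          rw [ih, hidx]
          simp [List.take_succ_cons, hs']
        · have hs' : v ∉ scope := by simpa using hs
          simp only [make_kernel_alt_go, if_neg hv, if_neg hs]
          rw [ih, hidx]
          simp [List.take_succ_cons, hs']

-- ===== VERDICT (by name: the statement is the Claim_ definition above) =====
theorem make_kernel_py_spec : Claim_equal_make_kernel_py := by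
  intro vi scope topo P_label _
  unfold Spec_make_kernel_py make_kernel_py make_kernel_py_alt
  rw [make_kernel_alt_go_eq]
  cases hidx : PySem.List.index? topo vi with
  | none => rfl
  | some n =>
    simp only [PySem.List.slice_to_natCast, pvRender, List.nil_append]
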